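-- pv_equiv track=rewrite | github.com/yunusdemirci/DefectiveRamsey | gengraph.py | has_set_size_k_with_last
-- ===== SOURCE A (Python) =====
-- import itertools  # for combinations, count
--
-- def is_k_sparse(g, s, k):
--     for v in s:
--         d = 0
--         for x in g[v]:
--             if x in s:
--                 d += 1
--                 if d > k:
--                     return False
--     return True
--
-- def is_k_dense(g, s, k):
--     for v in s:
--         d = 0
--         for x in s:
--             if x != v and x not in g[v]:
--                 d += 1
--                 if d > k:
--                     return False
--     return True
--
-- def has_set_size_k_with_last(k, a, g, sparse_or_dense):
--     """Return True if g contains k sparse or dense set (depend on sparse_or_dense)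
--     of order a containing vertex n-1.
--
--     Arguments:
--     k -- nonnegative int
--     a -- nonnegative int
--     g -- graph
--     sparse_or_dense -- boolean
--       We search for an order-a k dense or sparse-set. If sparse_or_dense is True we
--     looking for dense set, otherwise sparse set.
--
--     See isograph.py for our graph representation.
--
--     >>> g = [ [3], [3], [3], [0,1,2] ]
--     >>> has_fset_with_last(0, 2, g, True)
--     True
--     >>> has_fset_with_last(0, 2, g, False)
--     False
--     """
--     if a < 1:
--         return False
--
--     n = len(g)
--     if a > n:
--         return False
--
--     for ss in itertools.combinations(range(n-1), a-1):
--         s = ss + (n-1,)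
--         if sparse_or_dense and is_k_sparse(g, s, k):
--             return True
--         elif not(sparse_or_dense) and is_k_dense(g, s, k):
--             return True
--     return False
-- ===== SOURCE B (Python) =====
-- def has_set_size_k_with_last(k, a, g, sparse_or_dense):
--     """Depth-first backtracking search with pruning: build the candidate set
--     (always containing vertex n-1) by picking vertices in increasing order,
--     and abandon a branch as soon as the partial set already violates the
--     k-sparse / k-dense bound (the violation can only grow)."""
--     if a < 1:
--         return False
--     n = len(g)
--     if a > n:
--         return False
--     m = n - 1  # the mandatory last vertex
--
--     def ok(s):
--         if sparse_or_dense: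
--             return all(sum(1 for x in g[v] if x in s) <= k for v in s)
--         return all(sum(1 for x in s if x != v and x not in g[v]) <= k for v in s)
--
--     def dfs(need, s, start):
--         if not ok(s + [m]):
--             return False
--         if need == 0:
--             return True
--         for v in range(start, m):
--             if dfs(need - 1, s + [v], v + 1):
--                 return True
--         return False
--
--     return dfs(a - 1, [], 0)
-- ===== Notes on version B (the rewrite author's own statement) =====
-- stated objective: alternative
-- what changed: Replaces the flat itertools.combinations enumeration with a recursive depth-first backtracking search that extends the partial set (always containing vertex n-1) in increasing vertex order and prunes a branch as soon as the partial set already violates the k-sparse/k-dense bound.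
-- outside the precondition, e.g. on has_set_size_k_with_last(-1, 1, [[]], True): A returns True, B returns False
import Mathlib
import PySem

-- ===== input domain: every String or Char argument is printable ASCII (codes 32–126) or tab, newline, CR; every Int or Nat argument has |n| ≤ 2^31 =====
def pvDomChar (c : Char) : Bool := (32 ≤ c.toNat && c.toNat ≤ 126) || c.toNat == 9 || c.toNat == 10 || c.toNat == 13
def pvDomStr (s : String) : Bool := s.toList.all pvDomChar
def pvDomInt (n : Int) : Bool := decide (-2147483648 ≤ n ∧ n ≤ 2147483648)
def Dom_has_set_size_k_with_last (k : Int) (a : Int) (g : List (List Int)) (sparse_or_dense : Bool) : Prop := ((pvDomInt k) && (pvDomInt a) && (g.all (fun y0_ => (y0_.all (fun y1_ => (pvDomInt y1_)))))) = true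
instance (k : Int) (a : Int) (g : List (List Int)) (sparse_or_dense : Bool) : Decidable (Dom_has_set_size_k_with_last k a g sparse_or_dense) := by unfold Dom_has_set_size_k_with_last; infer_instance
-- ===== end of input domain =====

-- B replaces the flat combinations enumeration with a pruned depth-first backtracking
-- search (objective: alternative decomposition, same worst-case cost).

-- g[v] for an index v that the algorithms only ever take in range 0..len(g)-1 (exact there)
def pvRow (g : List (List Int)) (v : Int) : List Int := (PySem.List.pyGet? g v).getD []

-- ===== PORT A =====
def pvInnerSparse (s : List Int) (k : Int) : List Int → Int → Bool
  | [], _ => false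
  | x :: xs, d =>
    if s.contains x then
      if d + 1 > k then true else pvInnerSparse s k xs (d + 1)
    else pvInnerSparse s k xs d

def pvIsKSparse (g : List (List Int)) (s : List Int) (k : Int) : Bool :=
  s.all (fun v => !pvInnerSparse s k (pvRow g v) 0)

def pvInnerDense (gv : List Int) (v : Int) (k : Int) : List Int → Int → Bool
  | [], _ => false
  | x :: xs, d =>
    if x != v && !gv.contains x then
      if d + 1 > k then true else pvInnerDense gv v k xs (d + 1)
    else pvInnerDense gv v k xs d

def pvIsKDense (g : List (List Int)) (s : List Int) (k : Int) : Bool :=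
  s.all (fun v => !pvInnerDense (pvRow g v) v k s 0)

-- itertools.combinations(l, r) in lexicographic order
def pvCombos : List Int → Nat → List (List Int)
  | _, 0 => [[]]
  | [], _ + 1 => []
  | x :: xs, r + 1 => (pvCombos xs r).map (fun t => x :: t) ++ pvCombos xs (r + 1)

-- range(start, m) as a list of ints
def pvIntRange (start m : Nat) : List Int := (List.range' start (m - start)).map Int.ofNat

def has_set_size_k_with_last (k : Int) (a : Int) (g : List (List Int)) (sparse_or_dense : Bool) : Bool :=
  if a < 1 then false
  else
    let n := g.length
    if a > (n : Int) then false
    else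
      (pvCombos (pvIntRange 0 (n - 1)) (a - 1).toNat).any (fun ss =>
        let s := ss ++ [((n - 1 : Nat) : Int)]
        (sparse_or_dense && pvIsKSparse g s k) || (!sparse_or_dense && pvIsKDense g s k))

-- ===== PORT B =====
def pvOkAlt (g : List (List Int)) (k : Int) (sd : Bool) (s : List Int) : Bool :=
  if sd then
    s.all (fun v => decide (((pvRow g v).countP (fun x => s.contains x) : Int) ≤ k))
  else
    s.all (fun v => decide ((s.countP (fun x => x != v && !(pvRow g v).contains x) : Int) ≤ k))

def pvDfs (g : List (List Int)) (k : Int) (sd : Bool) (m : Nat) (need : Nat)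
    (s : List Int) (start : Nat) : Bool :=
  if !pvOkAlt g k sd (s ++ [(m : Int)]) then false
  else
    match need with
    | 0 => true
    | need' + 1 =>
      (List.range' start (m - start)).any
        (fun v => pvDfs g k sd m need' (s ++ [(v : Int)]) (v + 1))

def has_set_size_k_with_last_alt (k : Int) (a : Int) (g : List (List Int)) (sparse_or_dense : Bool) : Bool :=
  if a < 1 then false
  else
    let n := g.length
    if a > (n : Int) then false
    else pvDfs g k sparse_or_dense (n - 1) (a - 1).toNat [] 0

-- ===== PRECONDITION & SPEC =====
-- Pre_ excludes negative k together with a feasible order (1 ≤ a ≤ len(g)): k is documented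
-- nonnegative, and there A's checkers test the bound only after an increment, accidentally
-- treating k < 0 as k = 0, while B reads 'count ≤ k' literally.
def Pre_has_set_size_k_with_last (k : Int) (a : Int) (g : List (List Int)) (sparse_or_dense : Bool) : Prop :=
  0 ≤ k ∨ a < 1 ∨ (g.length : Int) < a
instance (k : Int) (a : Int) (g : List (List Int)) (sparse_or_dense : Bool) : Decidable (Pre_has_set_size_k_with_last k a g sparse_or_dense) := by unfold Pre_has_set_size_k_with_last; infer_instance

def pvWitness_has_set_size_k_with_last : Int × Int × List (List Int) × Bool := (0, 2, [[1], [0]], true)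

def Spec_has_set_size_k_with_last (k : Int) (a : Int) (g : List (List Int)) (sparse_or_dense : Bool) (out : Bool) : Prop := out = has_set_size_k_with_last_alt k a g sparse_or_dense
instance (k : Int) (a : Int) (g : List (List Int)) (sparse_or_dense : Bool) (out : Bool) : Decidable (Spec_has_set_size_k_with_last k a g sparse_or_dense out) := by unfold Spec_has_set_size_k_with_last; infer_instance

-- ===== CLAIM (what is proved, stated in full; the proofs are below) =====
def Claim_equal_has_set_size_k_with_last : Prop := ∀ (k : Int) (a : Int) (g : List (List Int)) (sparse_or_dense : Bool), Dom_has_set_size_k_with_last k a g sparse_or_dense → Pre_has_set_size_k_with_last k a g sparse_or_dense → Spec_has_set_size_k_with_last k a g sparse_or_dense (has_set_size_k_with_last k a g sparse_or_dense)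

-- ===== LEMMAS AND PROOFS =====

lemma pvInnerSparse_eq (s : List Int) (k : Int) (xs : List Int) (d : Int) :
    pvInnerSparse s k xs d
      = decide (0 < xs.countP (fun x => s.contains x)
          ∧ k < d + (xs.countP (fun x => s.contains x) : Int)) := by
  induction xs generalizing d with
  | nil => simp [pvInnerSparse]
  | cons x xs ih =>
    simp only [pvInnerSparse, List.countP_cons]
    by_cases hx : s.contains x
    · simp only [hx, if_pos]
      by_cases hd : d + 1 > k
      · have : (0 : Nat) < xs.countP (fun x => s.contains x) + 1 := by omega
        simp only [if_pos hd]
        have hc : (0:Int) ≤ (xs.countP (fun x => s.contains x) : Int) := by positivity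
        symm; rw [decide_eq_true_iff]
        push_cast
        constructor
        · omega
        · omega
      · simp only [if_neg hd, ih]
        congr 1
        rw [eq_iff_iff]
        push_cast
        omega
    · simp only [hx, if_false, ih, Bool.false_eq_true]
      simp

lemma pvInnerDense_eq (gv : List Int) (v : Int) (k : Int) (xs : List Int) (d : Int) :
    pvInnerDense gv v k xs d
      = decide (0 < xs.countP (fun x => x != v && !gv.contains x)
          ∧ k < d + (xs.countP (fun x => x != v && !gv.contains x) : Int)) := by
  induction xs generalizing d with
  | nil => simp [pvInnerDense]
  | cons x xs ih =>
    simp only [pvInnerDense, List.countP_cons]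
    by_cases hx : (x != v && !gv.contains x) = true
    · simp only [hx, if_pos]
      by_cases hd : d + 1 > k
      · simp only [if_pos hd]
        symm; rw [decide_eq_true_iff]
        push_cast
        constructor
        · omega
        · omega
      · simp only [if_neg hd, ih]
        congr 1
        rw [eq_iff_iff]
        push_cast
        omega
    · simp only [hx, if_false, ih, Bool.false_eq_true]
      simp

-- under 0 ≤ k, A's dispatched checker equals B's checker
lemma check_eq (g : List (List Int)) (k : Int) (sd : Bool) (s : List Int) (hk : 0 ≤ k) :
    ((sd && pvIsKSparse g s k) || (!sd && pvIsKDense g s k)) = pvOkAlt g k sd s := by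
  cases sd with
  | true =>
    simp only [pvOkAlt, pvIsKSparse, Bool.true_and, Bool.not_true, Bool.false_and,
      Bool.or_false, if_pos]
    rw [Bool.eq_iff_iff, List.all_eq_true, List.all_eq_true]
    constructor <;> intro h v hv <;> have := h v hv <;>
      simp only [pvInnerSparse_eq, Bool.not_eq_eq_eq_not, Bool.not_true, decide_eq_false_iff_not,
        decide_eq_true_iff, not_and, not_lt] at this ⊢ <;> omega
  | false =>
    simp only [pvOkAlt, pvIsKDense, Bool.false_and, Bool.not_false, Bool.true_and,
      Bool.false_or, if_neg (by simp : ¬ (false = true))]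
    rw [Bool.eq_iff_iff, List.all_eq_true, List.all_eq_true]
    constructor <;> intro h v hv <;> have := h v hv <;>
      simp only [pvInnerDense_eq, Bool.not_eq_eq_eq_not, Bool.not_true, decide_eq_false_iff_not,
        decide_eq_true_iff, not_and, not_lt] at this ⊢ <;> omega

-- a violation on a subset persists on any superlist
lemma pvOkAlt_mono (g : List (List Int)) (k : Int) (sd : Bool) {S S' : List Int}
    (hsub : S.Sublist S') (h : pvOkAlt g k sd S' = true) : pvOkAlt g k sd S = true := by
  cases sd with
  | true =>
    simp only [pvOkAlt, if_pos, List.all_eq_true, decide_eq_true_iff] at h ⊢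
    intro v hv
    have h1 := h v (hsub.subset hv)
    have h2 : (pvRow g v).countP (fun x => S.contains x)
        ≤ (pvRow g v).countP (fun x => S'.contains x) := by
      apply List.countP_mono_left
      intro x _ hx
      simp only [List.contains_iff_mem] at hx ⊢
      exact hsub.subset hx
    omega
  | false =>
    simp only [pvOkAlt, Bool.false_eq_true, if_neg, List.all_eq_true, decide_eq_true_iff,
      not_false_iff] at h ⊢
    intro v hv
    have h1 := h v (hsub.subset hv)
    have h2 : S.countP (fun x => x != v && !(pvRow g v).contains x) ≤ S'.countP (fun x => x != v && !(pvRow g v).contains x) := hsub.countP_le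
    omega

lemma pvCombos_zero (l : List Int) : pvCombos l 0 = [[]] := by cases l <;> rfl

lemma pvCombos_cons_any (x : Int) (xs : List Int) (r : Nat) (P : List Int → Bool) :
    (pvCombos (x :: xs) (r + 1)).any P
      = ((pvCombos xs r).any (fun t => P (x :: t)) || (pvCombos xs (r + 1)).any P) := by
  simp [pvCombos, List.any_append, List.any_map, Function.comp_def]

lemma pvIntRange_empty {start m : Nat} (h : m ≤ start) : pvIntRange start m = [] := by
  simp [pvIntRange, Nat.sub_eq_zero_of_le h]

lemma pvIntRange_cons {start m : Nat} (h : start < m) :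
    pvIntRange start m = (start : Int) :: pvIntRange (start + 1) m := by
  have : m - start = (m - (start + 1)) + 1 := by omega
  simp [pvIntRange, this, List.range'_succ]

lemma pvCombos_decompose (m : Nat) (Q : List Int → Bool) :
    ∀ (j start : Nat), m - start = j → ∀ (r : Nat),
    (pvCombos (pvIntRange start m) (r + 1)).any Q
      = (List.range' start (m - start)).any
          (fun v => (pvCombos (pvIntRange (v + 1) m) r).any (fun t => Q ((v : Int) :: t))) := by
  intro j
  induction j with
  | zero =>
    intro start hj r
    have h : m ≤ start := by omega
    simp [pvIntRange_empty h, pvCombos, Nat.sub_eq_zero_of_le h]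
  | succ j ih =>
    intro start hj r
    have h : start < m := by omega
    rw [pvIntRange_cons h, pvCombos_cons_any]
    have hms : m - start = (m - (start + 1)) + 1 := by omega
    rw [hms, List.range'_succ, List.any_cons]
    congr 1
    have := ih (start + 1) (by omega) r
    rw [← Nat.sub_eq_iff_eq_add] at hms
    · rw [← hms] at this ⊢
      exact this
    · omega

lemma pvDfs_eq (g : List (List Int)) (k : Int) (sd : Bool) (m : Nat) :
    ∀ (need : Nat) (s : List Int) (start : Nat),
    pvDfs g k sd m need s start
      = (pvCombos (pvIntRange start m) need).any
          (fun t => pvOkAlt g k sd (s ++ t ++ [(m : Int)])) := by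
  intro need
  induction need with
  | zero =>
    intro s start
    rw [pvDfs, pvCombos_zero]
    by_cases h : pvOkAlt g k sd (s ++ [(m : Int)]) = true
    · simp [h]
    · simp [Bool.not_eq_true] at h
      simp [h]
  | succ need' ih =>
    intro s start
    rw [pvDfs]
    by_cases h : pvOkAlt g k sd (s ++ [(m : Int)]) = true
    · simp only [h, Bool.not_true, Bool.false_eq_true, if_neg, not_false_iff]
      rw [pvCombos_decompose m _ (m - start) start rfl need']
      refine List.any_congr rfl (fun v => ?_)
      rw [ih (s ++ [(v : Int)]) (v + 1)]
      refine List.any_congr rfl (fun t => ?_)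
      simp
    · simp only [Bool.not_eq_true] at h
      simp only [h, Bool.not_false, if_pos]
      symm
      rw [List.any_eq_false]
      intro t ht
      intro hcon
      have hsub : (s ++ [(m : Int)]).Sublist (s ++ t ++ [(m : Int)]) := by
        rw [List.append_assoc]
        exact (List.sublist_append_right t [(m : Int)]).append_left s
      have := pvOkAlt_mono g k sd hsub hcon
      rw [this] at h
      simp at h

-- ===== VERDICT (by name: the statement is the Claim_ definition above) =====
theorem has_set_size_k_with_last_spec : Claim_equal_has_set_size_k_with_last := by
  intro k a g sd _ hPre
  unfold Spec_has_set_size_k_with_last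
  unfold has_set_size_k_with_last has_set_size_k_with_last_alt
  by_cases ha : a < 1
  · simp [ha]
  · simp only [ha, if_neg, not_false_iff]
    by_cases han : a > (g.length : Int)
    · simp [han]
    · simp only [han, if_neg, not_false_iff]
      have hk : 0 ≤ k := by
        rcases hPre with h | h | h
        · exact h
        · omega
        · omega
      rw [pvDfs_eq g k sd (g.length - 1) (a - 1).toNat [] 0]
      refine List.any_congr rfl (fun ss => ?_)
      simp only [List.nil_append]
      exact check_eq g k sd (ss ++ [((g.length - 1 : Nat) : Int)]) hk
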